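-- pv_equiv track=rewrite | github.com/lahfir/pilot | src/pilot/crew_tools/gui_interaction_tools.py | _score_target_match
-- ===== SOURCE A (Python) =====
-- def _score_target_match(
--
--     label: str,
--     identifier: str,
--     role: str,
--     variants: list[str],
--     target_lower: str,
-- ) -> int:
--     label_lower = label.lower()
--     identifier_lower = identifier.lower()
--     score = 0
--
--     for variant in variants:
--         variant_lower = variant.lower()
--         if label_lower == variant_lower:
--             score = max(score, 100)
--         elif identifier_lower == variant_lower:
--             score = max(score, 95)
--         elif len(variant_lower) > 2 and variant_lower in label_lower:
--             score = max(score, 60)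
--         elif len(variant_lower) > 2 and variant_lower in identifier_lower:
--             score = max(score, 50)
--
--     if score == 0:
--         return 0
--
--     if "button" in role:
--         score += 10
--     if "menu" in role:
--         score -= 5
--     if label_lower == target_lower:
--         score += 5
--
--     return score
-- ===== SOURCE B (Python) =====
-- def _score_target_match(
--     label: str,
--     identifier: str,
--     role: str,
--     variants: list[str],
--     target_lower: str,
-- ) -> int:
--     label_lower = label.lower()
--     identifier_lower = identifier.lower()
--     lows = [v.lower() for v in variants]
--
--     if any(v == label_lower for v in lows):
--         score = 100
--     elif any(v == identifier_lower for v in lows):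
--         score = 95
--     elif any(len(v) > 2 and v in label_lower for v in lows):
--         score = 60
--     elif any(len(v) > 2 and v in identifier_lower for v in lows):
--         score = 50
--     else:
--         return 0
--
--     if "button" in role:
--         score += 10
--     if "menu" in role:
--         score -= 5
--     if label_lower == target_lower:
--         score += 5
--     return score
-- ===== Notes on version B (the rewrite author's own statement) =====
-- stated objective: alternative
-- what changed: Replaces the max-accumulating loop over variants with a priority-ordered cascade of any() existence checks (100/95/60/50), exploiting that each variant's elif chain contributes exactly one priority value so the loop's max is the highest priority met by any variant; post-adjustments unchanged.
import Mathlib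
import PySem

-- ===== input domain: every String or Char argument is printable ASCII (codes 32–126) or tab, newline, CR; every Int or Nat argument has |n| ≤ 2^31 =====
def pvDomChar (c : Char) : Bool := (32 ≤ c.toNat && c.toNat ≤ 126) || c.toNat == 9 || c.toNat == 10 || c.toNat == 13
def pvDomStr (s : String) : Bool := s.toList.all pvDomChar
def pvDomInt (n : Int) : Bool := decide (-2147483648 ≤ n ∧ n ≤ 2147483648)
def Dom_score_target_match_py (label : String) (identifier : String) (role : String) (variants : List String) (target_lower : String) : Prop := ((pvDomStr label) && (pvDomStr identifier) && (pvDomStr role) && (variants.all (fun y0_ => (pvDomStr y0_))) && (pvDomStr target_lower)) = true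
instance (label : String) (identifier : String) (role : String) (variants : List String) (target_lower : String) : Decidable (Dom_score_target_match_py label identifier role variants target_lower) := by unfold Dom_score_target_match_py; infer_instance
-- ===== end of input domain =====

-- B replaces A's max-accumulating loop by a priority-ordered cascade of any-exists checks (alternative decomposition; same cost).

-- ===== PORT A =====
def score_target_match_py (label : String) (identifier : String) (role : String) (variants : List String) (target_lower : String) : Int :=
  let labelLower := PySem.Str.lower label
  let identifierLower := PySem.Str.lower identifier
  let score : Int := variants.foldl (fun score variant =>
    let variantLower := PySem.Str.lower variant
    if labelLower == variantLower then max score 100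
    else if identifierLower == variantLower then max score 95
    else if decide (2 < PySem.Str.len variantLower) && PySem.Str.isIn variantLower labelLower then max score 60
    else if decide (2 < PySem.Str.len variantLower) && PySem.Str.isIn variantLower identifierLower then max score 50
    else score) 0
  if score == 0 then 0
  else
    let score := if PySem.Str.isIn "button" role then score + 10 else score
    let score := if PySem.Str.isIn "menu" role then score - 5 else score
    let score := if labelLower == target_lower then score + 5 else score
    score

-- ===== PORT B =====
def score_target_match_py_alt (label : String) (identifier : String) (role : String) (variants : List String) (target_lower : String) : Int :=
  let labelLower := PySem.Str.lower label
  let identifierLower := PySem.Str.lower identifier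
  let lows := variants.map PySem.Str.lower
  let adjust : Int → Int := fun s =>
    let s := if PySem.Str.isIn "button" role then s + 10 else s
    let s := if PySem.Str.isIn "menu" role then s - 5 else s
    let s := if labelLower == target_lower then s + 5 else s
    s
  if lows.any (fun v => v == labelLower) then adjust 100
  else if lows.any (fun v => v == identifierLower) then adjust 95
  else if lows.any (fun v => decide (2 < PySem.Str.len v) && PySem.Str.isIn v labelLower) then adjust 60
  else if lows.any (fun v => decide (2 < PySem.Str.len v) && PySem.Str.isIn v identifierLower) then adjust 50
  else 0

-- ===== PRECONDITION & SPEC =====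
def Spec_score_target_match_py (label : String) (identifier : String) (role : String) (variants : List String) (target_lower : String) (out : Int) : Prop := out = score_target_match_py_alt label identifier role variants target_lower
instance (label : String) (identifier : String) (role : String) (variants : List String) (target_lower : String) (out : Int) : Decidable (Spec_score_target_match_py label identifier role variants target_lower out) := by unfold Spec_score_target_match_py; infer_instance

-- ===== CLAIM (what is proved, stated in full; the proofs are below) =====
def Claim_equal_score_target_match_py : Prop := ∀ (label : String) (identifier : String) (role : String) (variants : List String) (target_lower : String), Dom_score_target_match_py label identifier role variants target_lower → Spec_score_target_match_py label identifier role variants target_lower (score_target_match_py label identifier role variants target_lower)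

-- ===== LEMMAS AND PROOFS =====

-- per-variant priority value of A's elif chain (applied to an already-lowered variant)
def pvC (L I : String) (v : String) : Int :=
  if v == L then 100
  else if v == I then 95
  else if decide (2 < PySem.Str.len v) && PySem.Str.isIn v L then 60
  else if decide (2 < PySem.Str.len v) && PySem.Str.isIn v I then 50
  else 0

-- B's cascade value over a list of lowered variants
def pvCascade (L I : String) (vs : List String) : Int :=
  if vs.any (fun v => v == L) then 100
  else if vs.any (fun v => v == I) then 95
  else if vs.any (fun v => decide (2 < PySem.Str.len v) && PySem.Str.isIn v L) then 60
  else if vs.any (fun v => decide (2 < PySem.Str.len v) && PySem.Str.isIn v I) then 50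
  else 0

theorem pvCascade_cons (L I : String) (v : String) (vs : List String) :
    pvCascade L I (v :: vs) = max (pvC L I v) (pvCascade L I vs) := by
  cases h1 : (v == L) <;> cases h2 : (v == I) <;>
    cases h3 : (decide (2 < PySem.Str.len v) && PySem.Str.isIn v L) <;>
    cases h4 : (decide (2 < PySem.Str.len v) && PySem.Str.isIn v I) <;>
    cases g1 : vs.any (fun v => v == L) <;> cases g2 : vs.any (fun v => v == I) <;>
    cases g3 : vs.any (fun v => decide (2 < PySem.Str.len v) && PySem.Str.isIn v L) <;>
    cases g4 : vs.any (fun v => decide (2 < PySem.Str.len v) && PySem.Str.isIn v I) <;>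
    simp only [pvCascade, pvC, List.any_cons, h1, h2, h3, h4, g1, g2, g3, g4,
      Bool.false_or, Bool.true_or, Bool.or_false, Bool.or_true,
      if_true, if_false, ite_true, ite_false] <;> first | omega | (split_ifs <;> omega)

theorem pvStep (L I : String) (v : String) (s : Int) (hs : 0 ≤ s) :
    (if L == v then max s 100
     else if I == v then max s 95
     else if decide (2 < PySem.Str.len v) && PySem.Str.isIn v L then max s 60
     else if decide (2 < PySem.Str.len v) && PySem.Str.isIn v I then max s 50
     else s) = max s (pvC L I v) := by
  simp only [pvC, beq_iff_eq]
  by_cases h1 : v = L <;> by_cases h2 : v = I <;>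
    simp only [h1, h2, eq_comm] <;> split_ifs <;> simp_all

theorem pvFoldl_eq_max_cascade (L I : String) (vs : List String) :
    ∀ s : Int, 0 ≤ s →
      vs.foldl (fun score variant =>
        let variantLower := PySem.Str.lower variant
        if L == variantLower then max score 100
        else if I == variantLower then max score 95
        else if decide (2 < PySem.Str.len variantLower) && PySem.Str.isIn variantLower L then max score 60
        else if decide (2 < PySem.Str.len variantLower) && PySem.Str.isIn variantLower I then max score 50
        else score) s = max s (pvCascade L I (vs.map PySem.Str.lower)) := by
  induction vs with
  | nil => intro s hs; simp [pvCascade]; omega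
  | cons v vs ih =>
    intro s hs
    simp only [List.foldl_cons, List.map_cons]
    rw [show (let variantLower := PySem.Str.lower v;
        if L == variantLower then max s 100
        else if I == variantLower then max s 95
        else if decide (2 < PySem.Str.len variantLower) && PySem.Str.isIn variantLower L then max s 60
        else if decide (2 < PySem.Str.len variantLower) && PySem.Str.isIn variantLower I then max s 50
        else s) = max s (pvC L I (PySem.Str.lower v)) from pvStep L I (PySem.Str.lower v) s hs]
    rw [ih _ (by omega), pvCascade_cons]
    omega

set_option maxHeartbeats 2000000 in
theorem score_target_match_py_eq (label identifier role : String) (variants : List String) (target_lower : String) :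
    score_target_match_py label identifier role variants target_lower = score_target_match_py_alt label identifier role variants target_lower := by
  simp only [score_target_match_py, score_target_match_py_alt]
  rw [pvFoldl_eq_max_cascade (PySem.Str.lower label) (PySem.Str.lower identifier) variants 0 le_rfl]
  cases g1 : (variants.map PySem.Str.lower).any (fun v => v == PySem.Str.lower label) <;>
  cases g2 : (variants.map PySem.Str.lower).any (fun v => v == PySem.Str.lower identifier) <;>
  cases g3 : (variants.map PySem.Str.lower).any (fun v => decide (2 < PySem.Str.len v) && PySem.Str.isIn v (PySem.Str.lower label)) <;>
  cases g4 : (variants.map PySem.Str.lower).any (fun v => decide (2 < PySem.Str.len v) && PySem.Str.isIn v (PySem.Str.lower identifier)) <;>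
  simp only [pvCascade, g1, g2, g3, g4] <;> split_ifs <;> first | contradiction | rfl

-- ===== VERDICT (by name: the statement is the Claim_ definition above) =====
theorem score_target_match_py_spec : Claim_equal_score_target_match_py := by
  intro label identifier role variants target_lower _
  exact score_target_match_py_eq label identifier role variants target_lower
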